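-- pv_equiv track=rewrite | github.com/RasmitDevkota/TSSORunItCodeIt2022 | tasks.py | nand
-- ===== SOURCE A (Python) =====
-- def nand(string):
--     bitstrings = string.split()
--
--     if len(string.split()) < 2:
--         return "Please enter two space-separated bitstrings of length < 128!"
--     elif len(bitstrings[0]) >= 128 or len(bitstrings[1]) >= 128:
--         return "Please enter two space-separated bitstrings of length < 128!"
--
--     if bitstrings[0].isdecimal() and bitstrings[1].isdecimal() and len(bitstrings[0]) == len(bitstrings[1]):
--         nand_result = ""
--
--         for i in range(len(bitstrings[0])):
--             bit1str = bitstrings[0][i]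
--             bit2str = bitstrings[1][i]
--
--             if bit1str in ["0", "1"] and bit2str in ["0", "1"]:
--                 bit1 = 1 if bit1str == "1" else 0
--                 bit2 = 1 if bit2str == "1" else 0
--             else:
--                 return "Please enter two space-separated bitstrings!"
--
--             nand_result += str(not (bit1 & bit2))
--
--         return nand_result.replace("True", "1").replace("False", "0")
--     else:
--         return "Please enter two space-separated bitstrings!"
-- ===== SOURCE B (Python) =====
-- def nand(string):
--     bitstrings = string.split()
--     if len(bitstrings) < 2:
--         return "Please enter two space-separated bitstrings of length < 128!"
--     a, b = bitstrings[0], bitstrings[1]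
--     if len(a) >= 128 or len(b) >= 128:
--         return "Please enter two space-separated bitstrings of length < 128!"
--     if not (a.isdecimal() and b.isdecimal() and len(a) == len(b)):
--         return "Please enter two space-separated bitstrings!"
--     if all(c in ("0", "1") for c in a + b):
--         x = 0
--         y = 0
--         for c, d in zip(a, b):
--             x = x * 2 + (c == "1")
--             y = y * 2 + (d == "1")
--         mask = (1 << len(a)) - 1
--         return format(mask ^ (x & y), "b").zfill(len(a))
--     return "Please enter two space-separated bitstrings!"
-- ===== Notes on version B (the rewrite author's own statement) =====
-- stated objective: alternative
-- what changed: A builds the result character by character, appending str(not (b1 & b2)) (True/False text) per position and fixing the string up with two final .replace calls; B converts both bitstrings to integers, computes the whole NAND as one masked XOR (mask ^ (x & y)) and formats it back as a zero-filled binary string.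
import Mathlib
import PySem

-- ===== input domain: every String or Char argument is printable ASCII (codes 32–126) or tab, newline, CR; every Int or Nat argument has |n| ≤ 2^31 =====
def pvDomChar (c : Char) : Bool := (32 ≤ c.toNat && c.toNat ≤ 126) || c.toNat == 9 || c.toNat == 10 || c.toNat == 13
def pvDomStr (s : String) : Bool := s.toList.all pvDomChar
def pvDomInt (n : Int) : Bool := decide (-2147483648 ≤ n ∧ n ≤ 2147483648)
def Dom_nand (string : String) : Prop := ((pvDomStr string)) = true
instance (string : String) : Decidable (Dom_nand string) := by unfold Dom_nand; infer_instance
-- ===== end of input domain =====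

-- B replaces A's per-character True/False string accumulation (plus the two final .replace calls)
-- by converting both bitstrings to integers and taking one masked XOR of them, formatted back in
-- binary (objective: alternative algorithm, same cost class).

-- ===== PORT A =====
def pvErrLen : List Char := "Please enter two space-separated bitstrings of length < 128!".toList
def pvErrBit : List Char := "Please enter two space-separated bitstrings!".toList

-- A's for-loop over range(len(bitstrings[0])) with its mid-loop `return` (the error message is the
-- `none` branch).  The `| _, _ => none` arm is unreachable: every index produced by range(len) is
-- in range, so pyGet? returns some there.
def nandLoop (l0 l1 : List Char) : List ℤ → List Char → Option (List Char)
  | [], acc => some acc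
  | i :: rest, acc =>
    match PySem.List.pyGet? l0 i, PySem.List.pyGet? l1 i with
    | some bit1, some bit2 =>
      if bit1 ∈ ['0', '1'] ∧ bit2 ∈ ['0', '1'] then
        let b1 : ℕ := if bit1 = '1' then 1 else 0
        let b2 : ℕ := if bit2 = '1' then 1 else 0
        -- nand_result += str(not (bit1 & bit2))
        nandLoop l0 l1 rest (acc ++ (if b1 &&& b2 = 0 then "True".toList else "False".toList))
      else none
    | _, _ => none

-- str.isdecimal() is ported as PySem.Chars.strIsdigit: exact on the ASCII domain Dom_nand admits.
-- bitstrings[0] / bitstrings[1] are ported with getD (in range: guarded by `length < 2` above).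
def nand (string : String) : String :=
  let bitstrings := PySem.Chars.split₀ string.toList
  if bitstrings.length < 2 then String.ofList pvErrLen
  else
    let b0 := bitstrings.getD 0 []
    let b1 := bitstrings.getD 1 []
    if 128 ≤ b0.length ∨ 128 ≤ b1.length then String.ofList pvErrLen
    else if PySem.Chars.strIsdigit b0 && PySem.Chars.strIsdigit b1 && (b0.length == b1.length) then
      match nandLoop b0 b1 (PySem.List.pyRange 0 (b0.length : ℤ)) [] with
      | some res =>
        String.ofList (PySem.Chars.replace
          (PySem.Chars.replace res "True".toList "1".toList) "False".toList "0".toList)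
      | none => String.ofList pvErrBit
    else String.ofList pvErrBit

-- ===== PORT B =====
-- Python B's `x & y`, `mask ^ _`, `1 << n`, `x*2 + (c=="1")` act on non-negative ints only, so
-- they are ported on ℕ (Python's &, ^, <<, *, + agree with ℕ's &&&, ^^^, <<<, *, + there).
def nand_alt (string : String) : String :=
  let bitstrings := PySem.Chars.split₀ string.toList
  if bitstrings.length < 2 then String.ofList pvErrLen
  else
    let a := bitstrings.getD 0 []
    let b := bitstrings.getD 1 []
    if 128 ≤ a.length ∨ 128 ≤ b.length then String.ofList pvErrLen
    else if !(PySem.Chars.strIsdigit a && PySem.Chars.strIsdigit b && (a.length == b.length)) then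
      String.ofList pvErrBit
    else if (a ++ b).all (fun c => c == '0' || c == '1') then
      let xy := (a.zip b).foldl
        (fun (xy : ℕ × ℕ) cd =>
          (xy.1 * 2 + (if cd.1 == '1' then 1 else 0), xy.2 * 2 + (if cd.2 == '1' then 1 else 0)))
        (0, 0)
      let mask : ℕ := (1 <<< a.length) - 1
      -- format(v, 'b').zfill(len(a))
      String.ofList (PySem.Chars.zfill (PySem.Int.toBinChars ((mask ^^^ (xy.1 &&& xy.2) : ℕ) : ℤ))
        (a.length : ℤ))
    else String.ofList pvErrBit

-- ===== PRECONDITION & SPEC =====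
def Spec_nand (string : String) (out : String) : Prop := out = nand_alt string
instance (string : String) (out : String) : Decidable (Spec_nand string out) := by unfold Spec_nand; infer_instance

-- ===== CLAIM (what is proved, stated in full; the proofs are below) =====
def Claim_equal_nand : Prop := ∀ (string : String), Dom_nand string → Spec_nand string (nand string)

-- ===== LEMMAS AND PROOFS =====

/-- The 4/5-char block A appends for one pair of bits. -/
def pvBlk (p : Char × Char) : List Char :=
  if p.1 = '1' ∧ p.2 = '1' then "False".toList else "True".toList

/-- The block after the first replace ("True" → "1"). -/
def pvBlk1 (p : Char × Char) : List Char :=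
  if p.1 = '1' ∧ p.2 = '1' then "False".toList else ['1']

/-- The final NAND character for one pair of bits. -/
def pvNandChar (p : Char × Char) : Char :=
  if p.1 = '1' ∧ p.2 = '1' then '0' else '1'

/-- MSB-first binary value, accumulated the way B's loop does. -/
def pvBitsVal (l : List Char) : ℕ :=
  l.foldl (fun x c => x * 2 + (if c == '1' then 1 else 0)) 0

/-- The low `n` bits of `v`, MSB first. -/
def pvFullBits : ℕ → ℕ → List Char
  | 0, _ => []
  | n + 1, v => pvFullBits n (v / 2) ++ [Nat.digitChar (v % 2)]

/-- Binary digits of `v`, MSB first, no leading zeros (`[]` for 0). -/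
def pvNatBits (v : ℕ) : List Char :=
  if h : v = 0 then [] else pvNatBits (v / 2) ++ [Nat.digitChar (v % 2)]
decreasing_by exact Nat.div_lt_self (Nat.pos_of_ne_zero h) (by norm_num)

-- ---- A's loop produces the True/False blocks ----

theorem pvNandLoop_spec (l0 l1 : List Char) (hlen : l0.length = l1.length) :
    ∀ (k i : ℕ) (acc : List Char), i + k = l0.length →
    nandLoop l0 l1 ((List.range' i k).map Int.ofNat) acc =
      (if ((l0.drop i ++ l1.drop i).all fun c => c == '0' || c == '1') then
        some (acc ++ (((l0.drop i).zip (l1.drop i)).map pvBlk).flatten)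
      else none) := by
  intro k
  induction k with
  | zero =>
    intro i acc hik
    have h0 : l0.drop i = [] := List.drop_eq_nil_of_le (by omega)
    have h1 : l1.drop i = [] := List.drop_eq_nil_of_le (by omega)
    simp [nandLoop, h0, h1]
  | succ k ih =>
    intro i acc hik
    have hi0 : i < l0.length := by omega
    have hi1 : i < l1.length := by omega
    rw [List.range'_succ, List.map_cons]
    rw [show ((Int.ofNat i)) = ((i : ℕ) : ℤ) from rfl]
    rw [nandLoop]
    rw [PySem.List.pyGet?_natCast l0 i, PySem.List.pyGet?_natCast l1 i]
    rw [List.getElem?_eq_getElem hi0, List.getElem?_eq_getElem hi1]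
    simp only []
    by_cases hg : l0[i] ∈ ['0', '1'] ∧ l1[i] ∈ ['0', '1']
    · rw [if_pos hg]
      have hg' : (l0[i] = '0' ∨ l0[i] = '1') ∧ (l1[i] = '0' ∨ l1[i] = '1') := by
        simpa using hg
      have hg0 : (l0[i] == '0' || l0[i] == '1') = true := by
        rcases hg'.1 with h | h <;> rw [h] <;> rfl
      have hg1 : (l1[i] == '0' || l1[i] == '1') = true := by
        rcases hg'.2 with h | h <;> rw [h] <;> rfl
      rw [ih (i + 1) _ (by omega)]
      have hcond : ((List.drop i l0 ++ List.drop i l1).all fun c => c == '0' || c == '1')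
          = ((List.drop (i + 1) l0 ++ List.drop (i + 1) l1).all fun c => c == '0' || c == '1') := by
        conv_lhs => rw [List.drop_eq_getElem_cons hi0, List.drop_eq_getElem_cons hi1]
        simp only [List.all_append, List.all_cons, hg0, hg1, Bool.true_and]
      rw [hcond]
      by_cases hrest : ((List.drop (i + 1) l0 ++ List.drop (i + 1) l1).all
          fun c => c == '0' || c == '1') = true
      · rw [if_pos hrest, if_pos hrest]
        have hzip : (List.drop i l0).zip (List.drop i l1) =
            (l0[i], l1[i]) :: ((List.drop (i + 1) l0).zip (List.drop (i + 1) l1)) := by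
          conv_lhs => rw [List.drop_eq_getElem_cons hi0, List.drop_eq_getElem_cons hi1,
            List.zip_cons_cons]
        rw [hzip]
        simp only [List.map_cons, List.flatten_cons]
        rw [← List.append_assoc]
        have hblk : (if ((if l0[i] = '1' then (1:ℕ) else 0) &&& (if l1[i] = '1' then (1:ℕ) else 0)) = 0
              then "True".toList else "False".toList) = pvBlk (l0[i], l1[i]) := by
          rw [pvBlk]
          rcases hg'.1 with h0 | h0 <;> rcases hg'.2 with h1 | h1 <;> rw [h0, h1] <;> decide
        rw [hblk]
      · rw [if_neg (by simpa using hrest), if_neg (by simpa using hrest)]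
    · rw [if_neg hg]
      have hfalse : ((List.drop i l0 ++ List.drop i l1).all fun c => c == '0' || c == '1')
          = false := by
        rw [List.all_eq_false]
        simp only [List.mem_cons, not_and_or] at hg
        rcases hg with h | h
        · push Not at h
          refine ⟨l0[i], ?_, by simp [h.1, h.2]⟩
          rw [List.drop_eq_getElem_cons hi0]
          exact List.mem_append.mpr (Or.inl List.mem_cons_self)
        · push Not at h
          refine ⟨l1[i], ?_, by simp [h.1, h.2]⟩
          rw [List.drop_eq_getElem_cons hi1]
          exact List.mem_append.mpr (Or.inr List.mem_cons_self)
      rw [hfalse]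
      simp

-- ---- the two .replace calls turn the blocks into the bit characters ----

theorem pvGo_nil (old new : List Char) (f : ℕ) (acc : List Char) :
    PySem.Chars.replace.go old new f [] acc = acc.reverse := by
  cases f <;> rw [PySem.Chars.replace.go] <;> simp

theorem pvGo_nomatch (old new : List Char) (f : ℕ) (c : Char) (t acc : List Char)
    (h : old.isPrefixOf (c :: t) = false) :
    PySem.Chars.replace.go old new (f + 1) (c :: t) acc =
      PySem.Chars.replace.go old new f t (c :: acc) := by
  rw [PySem.Chars.replace.go]; simp [h]

theorem pvGo_match (old new : List Char) (f : ℕ) (c : Char) (t acc : List Char)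
    (h : old.isPrefixOf (c :: t) = true) :
    PySem.Chars.replace.go old new (f + 1) (c :: t) acc =
      PySem.Chars.replace.go old new f (List.drop old.length (c :: t)) (new.reverse ++ acc) := by
  rw [PySem.Chars.replace.go]; simp [h]

theorem pvGo_skip (c0 : Char) (old' new : List Char) :
    ∀ (pre : List Char), (∀ c ∈ pre, c ≠ c0) → ∀ (f : ℕ) (l acc : List Char),
    PySem.Chars.replace.go (c0 :: old') new (pre.length + f) (pre ++ l) acc =
      PySem.Chars.replace.go (c0 :: old') new f l (pre.reverse ++ acc) := by
  intro pre
  induction pre with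
  | nil => intro _ f l acc; simp
  | cons c pre ih =>
    intro hne f l acc
    have hc : c ≠ c0 := hne c (by simp)
    rw [show (c :: pre).length + f = (pre.length + f) + 1 from by simp; omega]
    rw [List.cons_append]
    rw [pvGo_nomatch _ _ _ _ _ _ (by
      simp [List.isPrefixOf]
      intro h; exact absurd h.symm hc)]
    rw [ih (fun x hx => hne x (by simp [hx])) f l (c :: acc)]
    simp

set_option maxRecDepth 4096 in
theorem pvGoTrue (ps : List (Char × Char)) : ∀ (k : ℕ) (acc : List Char),
    PySem.Chars.replace.go "True".toList "1".toList ((ps.map pvBlk).flatten.length + k)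
      (ps.map pvBlk).flatten acc = acc.reverse ++ (ps.map pvBlk1).flatten := by
  induction ps with
  | nil => intro k acc; simp [pvGo_nil]
  | cons p ps ih =>
    intro k acc
    by_cases hp : p.1 = '1' ∧ p.2 = '1'
    · -- block "False": five non-matching steps
      simp only [List.map_cons, List.flatten_cons, pvBlk, pvBlk1, if_pos hp]
      rw [show ("False".toList ++ (ps.map pvBlk).flatten).length + k =
            "False".toList.length + ((ps.map pvBlk).flatten.length + k) from by simp; omega]
      rw [show "True".toList = 'T' :: "rue".toList from rfl]
      rw [pvGo_skip 'T' "rue".toList "1".toList "False".toList (by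
        intro c hc
        simp only [show "False".toList = ['F','a','l','s','e'] from rfl] at hc
        fin_cases hc <;> decide)]
      rw [show ('T' :: "rue".toList) = "True".toList from rfl]
      rw [ih k _]
      simp
    · -- block "True": one matching step
      simp only [List.map_cons, List.flatten_cons, pvBlk, pvBlk1, if_neg hp]
      rw [show ("True".toList ++ (ps.map pvBlk).flatten).length + k =
            ((ps.map pvBlk).flatten.length + (k + 3)) + 1 from by simp; omega]
      rw [show "True".toList ++ (ps.map pvBlk).flatten =
            'T' :: ("rue".toList ++ (ps.map pvBlk).flatten) from rfl]
      rw [pvGo_match _ _ _ _ _ _ (by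
        rw [List.isPrefixOf_iff_prefix]
        exact List.prefix_append _ _)]
      rw [show List.drop "True".toList.length ('T' :: ("rue".toList ++ (ps.map pvBlk).flatten)) =
            (ps.map pvBlk).flatten from by simp]
      rw [ih (k + 3) _]
      simp

set_option maxRecDepth 4096 in
theorem pvGoFalse (ps : List (Char × Char)) : ∀ (k : ℕ) (acc : List Char),
    PySem.Chars.replace.go "False".toList "0".toList ((ps.map pvBlk1).flatten.length + k)
      (ps.map pvBlk1).flatten acc = acc.reverse ++ ps.map pvNandChar := by
  induction ps with
  | nil => intro k acc; simp [pvGo_nil]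
  | cons p ps ih =>
    intro k acc
    by_cases hp : p.1 = '1' ∧ p.2 = '1'
    · -- block "False": matching step
      simp only [List.map_cons, List.flatten_cons, pvBlk1, pvNandChar, if_pos hp]
      rw [show ("False".toList ++ (ps.map pvBlk1).flatten).length + k =
            ((ps.map pvBlk1).flatten.length + (k + 4)) + 1 from by simp; omega]
      rw [show "False".toList ++ (ps.map pvBlk1).flatten =
            'F' :: ("alse".toList ++ (ps.map pvBlk1).flatten) from rfl]
      rw [pvGo_match _ _ _ _ _ _ (by
        rw [List.isPrefixOf_iff_prefix]
        exact List.prefix_append _ _)]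
      rw [show List.drop "False".toList.length ('F' :: ("alse".toList ++ (ps.map pvBlk1).flatten)) =
            (ps.map pvBlk1).flatten from by simp]
      rw [ih (k + 4) _]
      simp
    · -- block ['1']: single non-matching step
      simp only [List.map_cons, List.flatten_cons, pvBlk1, pvNandChar, if_neg hp]
      rw [show (['1'] ++ (ps.map pvBlk1).flatten).length + k =
            ((ps.map pvBlk1).flatten.length + k) + 1 from by simp; omega]
      rw [show ['1'] ++ (ps.map pvBlk1).flatten = '1' :: (ps.map pvBlk1).flatten from rfl]
      rw [pvGo_nomatch _ _ _ _ _ _ (by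
        simp [List.isPrefixOf])]
      rw [ih k _]
      simp

theorem pvReplaceTrue (ps : List (Char × Char)) :
    PySem.Chars.replace (ps.map pvBlk).flatten "True".toList "1".toList =
      (ps.map pvBlk1).flatten := by
  rw [PySem.Chars.replace]
  rw [if_neg (by simp)]
  rw [show (ps.map pvBlk).flatten.length = (ps.map pvBlk).flatten.length + 0 from by omega]
  rw [pvGoTrue ps 0 []]
  simp

theorem pvReplaceFalse (ps : List (Char × Char)) :
    PySem.Chars.replace (ps.map pvBlk1).flatten "False".toList "0".toList =
      ps.map pvNandChar := by
  rw [PySem.Chars.replace]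
  rw [if_neg (by simp)]
  rw [show (ps.map pvBlk1).flatten.length = (ps.map pvBlk1).flatten.length + 0 from by omega]
  rw [pvGoFalse ps 0 []]
  simp

theorem pvReplace_spec (ps : List (Char × Char)) :
    PySem.Chars.replace (PySem.Chars.replace (ps.map pvBlk).flatten "True".toList "1".toList)
      "False".toList "0".toList = ps.map pvNandChar := by
  rw [pvReplaceTrue, pvReplaceFalse]

-- ---- B's fold computes the two binary values ----

theorem pvFoldZip (a : List Char) : ∀ (b : List Char) (x y : ℕ), a.length = b.length →
    (a.zip b).foldl
      (fun (xy : ℕ × ℕ) cd =>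
        (xy.1 * 2 + (if cd.1 == '1' then 1 else 0), xy.2 * 2 + (if cd.2 == '1' then 1 else 0)))
      (x, y) =
      (a.foldl (fun x c => x * 2 + (if c == '1' then 1 else 0)) x,
       b.foldl (fun x c => x * 2 + (if c == '1' then 1 else 0)) y) := by
  induction a with
  | nil =>
    intro b x y h
    have : b = [] := List.length_eq_zero_iff.mp h.symm
    subst this; simp
  | cons c a ih =>
    intro b x y h
    cases b with
    | nil => simp at h
    | cons d b =>
      simp only [List.zip_cons_cons, List.foldl_cons]
      exact ih b _ _ (by simpa using h)

theorem pvBitsVal_concat (l : List Char) (c : Char) :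
    pvBitsVal (l ++ [c]) = pvBitsVal l * 2 + (if c == '1' then 1 else 0) := by
  simp [pvBitsVal, List.foldl_append]

theorem pvBitsVal_lt (l : List Char) : pvBitsVal l < 2 ^ l.length := by
  induction l using List.reverseRecOn with
  | nil => simp [pvBitsVal]
  | append_singleton l c ih =>
    rw [pvBitsVal_concat]
    simp only [List.length_append, List.length_singleton]
    rw [pow_succ]
    split_ifs <;> omega

-- ---- binary formatting: format(v,'b').zfill(n) prints the low n bits ----

theorem pvToDigitsCore_eq : ∀ (f n : ℕ), n < 2 ^ f → ∀ (acc : List Char),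
    Nat.toDigitsCore 2 (f + 1) n acc = (if n = 0 then ['0'] else pvNatBits n) ++ acc := by
  intro f
  induction f with
  | zero =>
    intro n hn acc
    interval_cases n
    simp [Nat.toDigitsCore]; rfl
  | succ f ih =>
    intro n hn acc
    rw [Nat.toDigitsCore]
    by_cases h2 : n / 2 = 0
    · have : n = 0 ∨ n = 1 := by omega
      rcases this with rfl | rfl <;> simp [h2, pvNatBits, Nat.digitChar]
    · simp only [h2, if_neg (by omega : ¬ n = 0)]
      rw [ih (n / 2) (by omega) _]
      rw [if_neg h2]
      conv_rhs => rw [pvNatBits]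
      simp [if_neg (show ¬ n = 0 by omega)]

theorem pvToDigits_eq (n : ℕ) :
    Nat.toDigits 2 n = (if n = 0 then ['0'] else pvNatBits n) := by
  rw [Nat.toDigits]
  rw [pvToDigitsCore_eq n n (Nat.lt_two_pow_self) []]
  simp

theorem pvNatBits_chars (v : ℕ) : ∀ c ∈ pvNatBits v, c = '0' ∨ c = '1' := by
  induction v using Nat.strong_induction_on with
  | _ v ih =>
    intro c hc
    rw [pvNatBits] at hc
    by_cases h : v = 0
    · subst h; simp at hc
    · simp only [dif_neg h, List.mem_append, List.mem_singleton] at hc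
      rcases hc with hc | rfl
      · exact ih (v / 2) (Nat.div_lt_self (Nat.pos_of_ne_zero h) (by norm_num)) c hc
      · have : v % 2 = 0 ∨ v % 2 = 1 := by omega
        rcases this with h2 | h2 <;> rw [h2] <;> [left; right] <;> rfl

theorem pvNatBits_length : ∀ (n v : ℕ), v < 2 ^ n → (pvNatBits v).length ≤ n := by
  intro n
  induction n with
  | zero => intro v hv
            have hv0 : v = 0 := by simp at hv; omega
            subst hv0; rw [pvNatBits]; simp
  | succ n ih =>
    intro v hv
    rw [pvNatBits]
    by_cases h : v = 0
    · simp [h]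
    · simp only [dif_neg h, List.length_append, List.length_singleton]
      have := ih (v / 2) (by omega)
      omega

theorem pvFullBits_pad : ∀ (n v : ℕ), v < 2 ^ n →
    pvFullBits n v = List.replicate (n - (pvNatBits v).length) '0' ++ pvNatBits v := by
  intro n
  induction n with
  | zero => intro v hv
            have hv0 : v = 0 := by simp at hv; omega
            subst hv0; rw [pvFullBits, pvNatBits]; simp
  | succ n ih =>
    intro v hv
    rw [pvFullBits, ih (v / 2) (by omega)]
    by_cases h : v = 0
    · subst h
      rw [show pvNatBits 0 = [] from by rw [pvNatBits]; simp]
      simp [List.replicate_succ' (n := n)]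
      rfl
    · conv_rhs => rw [pvNatBits]
      rw [dif_neg h]
      have hlen : (pvNatBits (v / 2)).length ≤ n := pvNatBits_length n (v / 2) (by omega)
      have : n + 1 - ((pvNatBits (v / 2)).length + 1) = n - (pvNatBits (v / 2)).length := by omega
      simp [this]

theorem pvZfill_no_sign (cs : List Char) (n : ℕ) (h : cs.length ≤ n)
    (hh : ∀ c, cs.head? = some c → c ≠ '+' ∧ c ≠ '-') :
    PySem.Chars.zfill cs (n : ℤ) = List.replicate (n - cs.length) '0' ++ cs := by
  rw [PySem.Chars.zfill.eq_def]
  by_cases hle : (n : ℤ) ≤ (cs.length : ℤ)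
  · rw [if_pos hle]
    have : n = cs.length := by omega
    rw [this]; simp
  · rw [if_neg hle]
    cases cs with
    | nil => simp
    | cons c rest =>
      have := hh c rfl
      simp only [if_neg (by tauto : ¬ (c = '+' ∨ c = '-'))]
      simp

theorem pvZfill_eq (n v : ℕ) (hn : 1 ≤ n) (hv : v < 2 ^ n) :
    PySem.Chars.zfill (PySem.Int.toBinChars ((v : ℕ) : ℤ)) (n : ℤ) = pvFullBits n v := by
  have htb : PySem.Int.toBinChars ((v : ℕ) : ℤ) = Nat.toDigits 2 v := by
    rw [PySem.Int.toBinChars]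
    rw [if_neg (by omega : ¬ ((v : ℤ) < 0))]
    simp
  rw [htb, pvToDigits_eq, pvFullBits_pad n v hv]
  by_cases h0 : v = 0
  · subst h0
    rw [show pvNatBits 0 = [] from by rw [pvNatBits]; simp]
    rw [if_pos rfl]
    rw [pvZfill_no_sign ['0'] n (by simpa using hn) (by intro c hc; simp at hc; subst hc; decide)]
    simp only [List.append_nil, List.length_nil, Nat.sub_zero, List.length_singleton]
    rw [← List.replicate_succ' (n := n - 1)]
    congr 1; omega
  · rw [if_neg h0]
    have hlen : (pvNatBits v).length ≤ n := pvNatBits_length n v hv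
    rw [pvZfill_no_sign (pvNatBits v) n hlen]
    intro c hc
    have hcm : c ∈ pvNatBits v := by
      cases hx : pvNatBits v with
      | nil => rw [hx] at hc; simp at hc
      | cons d rest => rw [hx] at hc; simp at hc; subst hc; exact List.mem_cons_self
    have := pvNatBits_chars v c hcm
    rcases this with rfl | rfl <;> exact ⟨by decide, by decide⟩

-- ---- the masked-XOR value prints exactly the NAND characters ----

theorem pvTestBit_double_add (x i k : ℕ) (h : i < 2) :
    (2 * x + i).testBit (k + 1) = x.testBit k := by
  rw [← Nat.testBit_div_two]; congr 1; omega

theorem pvTestBit_zero_double_add (x i : ℕ) (h : i < 2) :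
    (2 * x + i).testBit 0 = decide (i = 1) := by
  rw [Nat.testBit_zero]; congr 1; simp only [eq_iff_iff]; omega

theorem pvNandHalf (n x y i j : ℕ) (hi : i < 2) (hj : j < 2) :
    ((2 ^ (n + 1) - 1) ^^^ ((2 * x + i) &&& (2 * y + j))) / 2 =
      (2 ^ n - 1) ^^^ (x &&& y) := by
  apply Nat.eq_of_testBit_eq
  intro k
  simp only [Nat.testBit_div_two, Nat.testBit_xor, Nat.testBit_land,
      Nat.testBit_two_pow_sub_one, pvTestBit_double_add x i k hi, pvTestBit_double_add y j k hj]
  congr 1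
  simp only [decide_eq_decide]
  omega

theorem pvNandLow (n x y i j : ℕ) (hi : i < 2) (hj : j < 2) :
    ((2 ^ (n + 1) - 1) ^^^ ((2 * x + i) &&& (2 * y + j))) % 2 =
      (if i = 1 ∧ j = 1 then 0 else 1) := by
  set E := ((2 ^ (n + 1) - 1) ^^^ ((2 * x + i) &&& (2 * y + j))) with hE
  have h0 : E.testBit 0 = !(decide (i = 1) && decide (j = 1)) := by
    rw [hE]
    simp only [Nat.testBit_xor, Nat.testBit_land, pvTestBit_zero_double_add x i hi,
        pvTestBit_zero_double_add y j hj, Nat.testBit_two_pow_sub_one]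
    simp
  have h2 : E % 2 = 0 ∨ E % 2 = 1 := Nat.mod_two_eq_zero_or_one E
  have h3 := Nat.testBit_zero E
  rw [h0] at h3
  by_cases hij : i = 1 ∧ j = 1
  · obtain ⟨rfl, rfl⟩ := hij
    rw [if_pos ⟨rfl, rfl⟩]
    simp at h3
    omega
  · rw [if_neg hij]
    rw [show (decide (i = 1) && decide (j = 1)) = false from by
      simp only [Bool.and_eq_false_iff, decide_eq_false_iff_not]; omega] at h3
    simp at h3
    omega

theorem pvNandBits (a : List Char) : ∀ (b : List Char), a.length = b.length →
    (∀ c ∈ a, c = '0' ∨ c = '1') → (∀ c ∈ b, c = '0' ∨ c = '1') →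
    pvFullBits a.length ((2 ^ a.length - 1) ^^^ (pvBitsVal a &&& pvBitsVal b)) =
      (a.zip b).map pvNandChar := by
  induction a using List.reverseRecOn with
  | nil =>
    intro b hb _ _
    have : b = [] := List.length_eq_zero_iff.mp hb.symm
    subst this
    simp [pvFullBits]
  | append_singleton a c ih =>
    intro b hb ha hbs
    rcases List.eq_nil_or_concat b with rfl | ⟨b', d, rfl⟩
    · simp at hb
    · rw [List.concat_eq_append] at *
      have hlen : a.length = b'.length := by simp at hb; omega
      rw [List.zip_append hlen]
      simp only [List.length_append, List.length_singleton, List.map_append]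
      rw [pvBitsVal_concat, pvBitsVal_concat]
      have hc : c = '0' ∨ c = '1' := ha c (by simp)
      have hd : d = '0' ∨ d = '1' := hbs d (by simp)
      set i : ℕ := if c == '1' then 1 else 0 with hi
      set j : ℕ := if d == '1' then 1 else 0 with hj
      have hi2 : i < 2 := by rw [hi]; split_ifs <;> omega
      have hj2 : j < 2 := by rw [hj]; split_ifs <;> omega
      rw [pvFullBits]
      rw [mul_comm (pvBitsVal a) 2, mul_comm (pvBitsVal b') 2]
      rw [pvNandHalf a.length _ _ i j hi2 hj2, pvNandLow a.length _ _ i j hi2 hj2]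
      rw [ih b' hlen (fun x hx => ha x (by simp [hx])) (fun x hx => hbs x (by simp [hx]))]
      congr 1
      simp only [List.zip_cons_cons, List.map_cons]
      congr 1
      rw [pvNandChar]
      rcases hc with rfl | rfl <;> rcases hd with rfl | rfl <;> simp [hi, hj] <;> rfl

-- ---- glue ----

theorem pvIsdigit_len (l : List Char) (h : PySem.Chars.strIsdigit l = true) : 1 ≤ l.length := by
  cases l with
  | nil => simp [PySem.Chars.strIsdigit] at h
  | cons c t => simp

-- ===== VERDICT (by name: the statement is the Claim_ definition above) =====
theorem nand_spec : Claim_equal_nand := by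
  intro string _hdom
  unfold Spec_nand nand nand_alt
  set bs := PySem.Chars.split₀ string.toList with hbs
  by_cases h1 : bs.length < 2
  · simp only [if_pos h1]
  · simp only [if_neg h1]
    set b0 := bs.getD 0 [] with hb0
    set b1 := bs.getD 1 [] with hb1
    by_cases h2 : 128 ≤ b0.length ∨ 128 ≤ b1.length
    · simp only [if_pos h2]
    · simp only [if_neg h2]
      by_cases h3 : (PySem.Chars.strIsdigit b0 && PySem.Chars.strIsdigit b1
          && (b0.length == b1.length)) = true
      · rw [if_pos h3, h3]
        simp only [Bool.not_true, Bool.false_eq_true, if_false]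
        have h3' := h3
        simp only [Bool.and_eq_true, beq_iff_eq] at h3'
        have hlen : b0.length = b1.length := h3'.2
        have hn1 : 1 ≤ b0.length := pvIsdigit_len b0 h3'.1.1
        by_cases h4 : ((b0 ++ b1).all fun c => c == '0' || c == '1') = true
        · rw [if_pos h4]
          -- A's side: the loop, then the two replaces
          rw [show PySem.List.pyRange 0 (b0.length : ℤ) =
                (List.range' 0 b0.length).map Int.ofNat from by
            rw [PySem.List.pyRange_zero_natCast, List.range_eq_range']; rfl]
          rw [pvNandLoop_spec b0 b1 hlen b0.length 0 [] (by omega)]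
          simp only [List.drop_zero]
          rw [if_pos h4]
          simp only [List.nil_append]
          rw [pvReplace_spec]
          -- B's side: the fold, then the masked XOR, then the formatting
          rw [pvFoldZip b0 b1 0 0 hlen]
          rw [show ((1 <<< b0.length) - 1 : ℕ) = 2 ^ b0.length - 1 from by
            rw [Nat.shiftLeft_eq, one_mul]]
          have hx : (b0.foldl (fun x c => x * 2 + (if c == '1' then 1 else 0)) 0) = pvBitsVal b0 := rfl
          have hy : (b1.foldl (fun x c => x * 2 + (if c == '1' then 1 else 0)) 0) = pvBitsVal b1 := rfl
          rw [hx, hy]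
          have hvlt : (2 ^ b0.length - 1) ^^^ (pvBitsVal b0 &&& pvBitsVal b1) < 2 ^ b0.length := by
            apply Nat.xor_lt_two_pow
            · exact Nat.sub_lt (by positivity) (by norm_num)
            · exact Nat.lt_of_le_of_lt Nat.and_le_left (pvBitsVal_lt b0)
          rw [pvZfill_eq b0.length _ hn1 hvlt]
          have hall : ∀ c ∈ b0 ++ b1, c = '0' ∨ c = '1' := by
            intro c hc
            have := List.all_eq_true.mp h4 c hc
            rcases (Bool.or_eq_true _ _).mp this with h | h
            · left; exact beq_iff_eq.mp h
            · right; exact beq_iff_eq.mp h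
          rw [pvNandBits b0 b1 hlen
            (fun c hc => hall c (List.mem_append.mpr (Or.inl hc)))
            (fun c hc => hall c (List.mem_append.mpr (Or.inr hc)))]
        · rw [if_neg (by simpa using h4)]
          rw [show PySem.List.pyRange 0 (b0.length : ℤ) =
                (List.range' 0 b0.length).map Int.ofNat from by
            rw [PySem.List.pyRange_zero_natCast, List.range_eq_range']; rfl]
          rw [pvNandLoop_spec b0 b1 hlen b0.length 0 [] (by omega)]
          simp only [List.drop_zero]
          rw [if_neg (by simpa using h4)]
      · rw [if_neg (by simpa using h3)]
        rw [show (!(PySem.Chars.strIsdigit b0 && PySem.Chars.strIsdigit b1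
            && (b0.length == b1.length))) = true from by
          simp only [Bool.not_eq_true'] at h3 ⊢
          exact Bool.not_eq_true _ ▸ (by simpa using h3)]
        simp
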